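-- pv_equiv track=rewrite | github.com/jamesdeluk/data-projects | wbw_translator/app.py | calculate_table_structure
-- ===== SOURCE A (Python) =====
-- def calculate_table_structure(words):
--     """Pre-calculate the complete table structure accounting for punctuation cells"""
--     if not words:
--         return []
--
--     words_per_row = 10
--     rows = []
--     current_row = []
--     current_row_cells = 0
--
--     for word in words:
--         if word.strip():
--             current_row.append(('word', word))
--             current_row_cells += 1
--
--             # Add extra empty cell after sentence-ending punctuation
--             if word.strip() and word.rstrip().endswith(('.', '?', '!')):
--                 current_row.append(('punctuation_space', ''))
--                 current_row_cells += 1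
--         else:
--             current_row.append(('empty', ''))
--             current_row_cells += 1
--
--         # If we've reached the row limit, start a new row
--         if current_row_cells >= words_per_row:
--             rows.append(current_row)
--             current_row = []
--             current_row_cells = 0
--
--     # Add the last row if it has content
--     if current_row:
--         rows.append(current_row)
--
--     return rows
-- ===== SOURCE B (Python) =====
-- def calculate_table_structure(words):
--     """Pre-calculate the complete table structure accounting for punctuation cells"""
--     # Phase 1: map each word to its atomic cell group.
--     groups = []
--     for word in words:
--         if word.strip():
--             if word.rstrip().endswith(('.', '?', '!')):
--                 groups.append([('word', word), ('punctuation_space', '')])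
--             else:
--                 groups.append([('word', word)])
--         else:
--             groups.append([('empty', '')])
--     # Phase 2: pack groups into rows of >= 10 cells.
--     rows = []
--     row = []
--     count = 0
--     for g in groups:
--         row.extend(g)
--         count += len(g)
--         if count >= 10:
--             rows.append(row)
--             row = []
--             count = 0
--     if row:
--         rows.append(row)
--     return rows
-- ===== Notes on version B (the rewrite author's own statement) =====
-- stated objective: alternative
-- what changed: B splits the work into two passes: a map from each word to its atomic cell group (word, optional punctuation cell, or empty cell), then a generic packing loop over groups that extends the current row and flushes at 10 cells; A interleaves classification, punctuation handling and row flushing in one loop over words with a separate cell counter.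
import Mathlib
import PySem

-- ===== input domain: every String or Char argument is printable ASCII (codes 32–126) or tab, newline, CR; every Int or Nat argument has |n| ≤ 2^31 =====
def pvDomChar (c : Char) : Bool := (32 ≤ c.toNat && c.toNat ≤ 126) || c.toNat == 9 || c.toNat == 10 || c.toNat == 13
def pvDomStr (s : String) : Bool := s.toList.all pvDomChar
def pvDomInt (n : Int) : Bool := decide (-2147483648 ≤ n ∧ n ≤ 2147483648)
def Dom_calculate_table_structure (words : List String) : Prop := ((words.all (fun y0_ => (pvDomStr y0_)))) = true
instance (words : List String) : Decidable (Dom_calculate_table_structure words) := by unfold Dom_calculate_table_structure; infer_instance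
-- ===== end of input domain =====

-- B replaces A's single interleaved loop by a map from words to atomic cell groups followed by a
-- generic row-packing fold (objective: alternative decomposition, same cost).

-- ===== PORT A =====
-- word.rstrip().endswith(('.', '?', '!'))
def ctsEndsPunct (word : String) : Bool :=
  PySem.Str.endswith (PySem.Str.rstrip word) "." ||
  PySem.Str.endswith (PySem.Str.rstrip word) "?" ||
  PySem.Str.endswith (PySem.Str.rstrip word) "!"

-- one iteration of A's `for word in words` loop, state = (rows, current_row, current_row_cells)
def ctsStepA (st : List (List (String × String)) × List (String × String) × Int) (word : String) :
    List (List (String × String)) × List (String × String) × Int :=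
  let rows := st.1
  let cur := st.2.1
  let cells := st.2.2
  let p : List (String × String) × Int :=
    if PySem.Str.strip word ≠ "" then
      let cur := cur ++ [("word", word)]
      let cells := cells + 1
      if PySem.Str.strip word ≠ "" ∧ ctsEndsPunct word = true then
        (cur ++ [("punctuation_space", "")], cells + 1)
      else
        (cur, cells)
    else
      (cur ++ [("empty", "")], cells + 1)
  if p.2 ≥ 10 then (rows ++ [p.1], [], 0) else (rows, p.1, p.2)

def calculate_table_structure (words : List String) : List (List (String × String)) :=
  if words = [] then []
  else
    let st := words.foldl ctsStepA ([], [], 0)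
    if st.2.1 ≠ [] then st.1 ++ [st.2.1] else st.1

-- ===== PORT B =====
-- phase 1: the atomic cell group of one word
def ctsGroup (word : String) : List (String × String) :=
  if PySem.Str.strip word ≠ "" then
    if ctsEndsPunct word = true then [("word", word), ("punctuation_space", "")]
    else [("word", word)]
  else [("empty", "")]

-- phase 2: pack one group into the row state (rows, row, count)
def ctsStepB (st : List (List (String × String)) × List (String × String) × Int)
    (g : List (String × String)) :
    List (List (String × String)) × List (String × String) × Int :=
  let row := st.2.1 ++ g
  let count := st.2.2 + (g.length : Int)
  if count ≥ 10 then (st.1 ++ [row], [], 0) else (st.1, row, count)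

def calculate_table_structure_alt (words : List String) : List (List (String × String)) :=
  let st := (words.map ctsGroup).foldl ctsStepB ([], [], 0)
  if st.2.1 ≠ [] then st.1 ++ [st.2.1] else st.1

-- ===== PRECONDITION & SPEC =====
def Spec_calculate_table_structure (words : List String) (out : List (List (String × String))) : Prop := out = calculate_table_structure_alt words
instance (words : List String) (out : List (List (String × String))) : Decidable (Spec_calculate_table_structure words out) := by unfold Spec_calculate_table_structure; infer_instance

-- ===== CLAIM (what is proved, stated in full; the proofs are below) =====
def Claim_equal_calculate_table_structure : Prop := ∀ (words : List String), Dom_calculate_table_structure words → Spec_calculate_table_structure words (calculate_table_structure words)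

-- ===== LEMMAS AND PROOFS =====

-- one A-step equals one B-step on that word's group
theorem ctsStep_eq (st : List (List (String × String)) × List (String × String) × Int)
    (w : String) : ctsStepA st w = ctsStepB st (ctsGroup w) := by
  simp only [ctsStepA, ctsStepB, ctsGroup]
  by_cases hs : PySem.Str.strip w ≠ "" <;>
    by_cases hp : ctsEndsPunct w = true <;>
      simp only [hs, hp, if_pos, if_neg, not_false_iff, List.length_cons, List.length_nil] <;>
      split_ifs <;> simp_all <;> omega

theorem ctsFold_eq (words : List String)
    (st : List (List (String × String)) × List (String × String) × Int) :
    words.foldl ctsStepA st = (words.map ctsGroup).foldl ctsStepB st := by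
  rw [List.foldl_map]
  induction words generalizing st with
  | nil => rfl
  | cons w ws ih => simp only [List.foldl_cons, ctsStep_eq, ih]

-- ===== VERDICT (by name: the statement is the Claim_ definition above) =====
theorem calculate_table_structure_spec : Claim_equal_calculate_table_structure := by
  intro words _
  unfold Spec_calculate_table_structure calculate_table_structure calculate_table_structure_alt
  rcases words with _ | ⟨w, ws⟩
  · simp
  · simp only [if_neg (List.cons_ne_nil w ws)]
    rw [ctsFold_eq]
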